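-- pv_equiv track=rewrite | github.com/bircow/doksit | doksit/models.py | markdown_raises_section
-- ===== SOURCE A (Python) =====
-- from typing import Any, Dict, List, Optional, Tuple
--
-- def markdown_raises_section(line_number: int, docstring: List[str]) \
--         -> List[str]:
--     """
--     Markdown the `Raises:` section.
--
--     Arguments:
--         line_number (int):
--             Where the `Raises` section starts.
--         docstring (List[str]):
--             Split docstring.
--
--     Example: (markdown)
--             Raises:
--                 AssertionError:
--                     Reason.
--                 ImportError:
--                     Long reason.
--                 KeyError: Reason.
--                 TypeError: Long
--                     reason.
--                 ValueError:
--                     1. reason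
--                     2. long
--                        reason
--
--         converts to:
--
--             **Raises:**
--
--             - AssertionError:
--                 - Reason.
--             - ImportError:
--                 - Long
--                   reason.
--             - KeyError:
--                 - Reason.
--             - TypeError:
--                 - Long
--                   reason.
--             - ValueError:
--                 1. reason
--                 2. long
--                    reason
--
--     Note:
--         Be careful with numbered error descriptions (one error type may
--         occur multiple times, eg. validation in the `__init__` method and
--         not separately in setters), you may use it maximally 9x times, then
--         a parser stops work.
--
--     Returns:
--         Updated split docstring with the markdowned `Raises` section.
--     """
--     docstring[line_number] = "**" + docstring[line_number] + "**\n"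
--
--     is_first_line_description = False
--     insert_text = []  # For descriptions on the same line as error names.
--
--     for number, line in enumerate(docstring[line_number + 1:],
--                                   start=line_number + 1):
--         if line.startswith(" " * 11):
--             docstring[number] = " " * 7 + line.lstrip(" ")
--
--         elif line.startswith(" " * 8):
--             lstrip_line = line.lstrip(" ")
--
--             if lstrip_line[0].isdigit() and lstrip_line[1] == ".":
--                 docstring[number] = " " * 4 + lstrip_line
--             else:
--                 if is_first_line_description:
--                     docstring[number] = "    - " + lstrip_line
--                     is_first_line_description = False
--                 else:
--                     docstring[number] = " " * 6 + lstrip_line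
--
--         elif line.startswith(" " * 4):
--             lstrip_line = line.lstrip(" ")
--
--             if line.endswith(":"):
--                 docstring[number] = "- " + lstrip_line
--                 is_first_line_description = True  # For the next line.
--
--             elif ":" in lstrip_line:
--                 colon_index = lstrip_line.index(":")
--                 docstring[number] = "- " + lstrip_line[:colon_index + 1]
--
--                 insert_text.append((number + 1,
--                                     lstrip_line[colon_index + 2:]))
--
--         elif line.startswith(""):  # End of the `Raises` section.
--             break
--
--     if insert_text:
--         for index, text in reversed(insert_text):
--             docstring.insert(index, "    - " + text)
--
--     return docstring
-- ===== SOURCE B (Python) =====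
-- def markdown_raises_section(line_number, docstring):
--     result = docstring[:line_number]
--     result.append("**" + docstring[line_number] + "**\n")
--     tail = docstring[line_number + 1:]
--     expect_description = False
--     i = 0
--     while i < len(tail):
--         line = tail[i]
--         stripped = line.lstrip(" ")
--         indent = len(line) - len(stripped)
--         if indent >= 11:
--             result.append(" " * 7 + stripped)
--         elif indent >= 8:
--             if stripped[:1].isdigit() and stripped[1:2] == ".":
--                 result.append(" " * 4 + stripped)
--             elif expect_description:
--                 result.append("    - " + stripped)
--                 expect_description = False
--             else:
--                 result.append(" " * 6 + stripped)
--         elif indent >= 4: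
--             if line.endswith(":"):
--                 result.append("- " + stripped)
--                 expect_description = True
--             elif ":" in stripped:
--                 c = stripped.index(":")
--                 result.append("- " + stripped[:c + 1])
--                 result.append("    - " + stripped[c + 2:])
--             else:
--                 result.append(line)
--         else:
--             result.extend(tail[i:])
--             break
--         i += 1
--     docstring[:] = result
--     return docstring
-- ===== Notes on version B (the rewrite author's own statement) =====
-- stated objective: simpler
-- what changed: B builds the markdowned section in a single forward pass over indent counts, appending the extracted '- name:' / ' - text' pair immediately, instead of A's in-place index assignments plus a collected list of (index, text) pairs replayed as reversed insertions afterward.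
-- outside the precondition, e.g. on markdown_raises_section(-1, ['x']): A returns ['**x**\n'], B returns ['**x**\n', 'x']; on markdown_raises_section(0, ['Raises:', '        7']): A raises IndexError, B returns ['**Raises:**\n', '      7']
-- crash fix: On in-range line_number where the scanned 4-space region contains an 8-to-10-space line whose lstrip(' ') is empty or a single digit, A raises IndexError (lstrip_line[0] / lstrip_line[1]) while B returns the section with that line re-indented normally. — e.g. on markdown_raises_section(0, ["Raises:", " 7"]): A raises IndexError, B returns ["**Raises:**\n", " 7"]
import Mathlib
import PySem

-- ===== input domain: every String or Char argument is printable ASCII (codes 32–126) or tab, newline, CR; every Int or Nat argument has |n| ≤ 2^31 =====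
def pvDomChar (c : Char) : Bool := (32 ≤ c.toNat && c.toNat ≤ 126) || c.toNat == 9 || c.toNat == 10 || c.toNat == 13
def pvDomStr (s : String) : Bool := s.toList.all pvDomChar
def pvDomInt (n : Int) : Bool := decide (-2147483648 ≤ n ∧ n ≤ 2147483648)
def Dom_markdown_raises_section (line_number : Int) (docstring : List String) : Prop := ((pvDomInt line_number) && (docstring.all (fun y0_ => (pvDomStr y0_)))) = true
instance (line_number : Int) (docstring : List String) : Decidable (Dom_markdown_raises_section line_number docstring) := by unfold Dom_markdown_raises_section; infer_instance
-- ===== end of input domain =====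

-- B makes one forward pass that appends the extracted '- name:' / '    - text' pair immediately
-- (classifying lines by their counted leading-space indent) instead of A's in-place edits followed
-- by reversed insertions; objective: simpler. Both Pythons mutate `docstring` in place and the final
-- list contents coincide, so the proved return-value equality covers the observable effect as well.

-- " " * n  (shared primitive)
def pvSpaces (n : Nat) : List Char := List.replicate n ' '

-- exact port of str.lstrip(" "): drop leading ' ' characters only (shared primitive)
def pvLstrip (cs : List Char) : List Char := cs.dropWhile (fun c => c == ' ')

-- ===== PORT A =====
-- the for-loop over enumerate(docstring[line_number+1:], start=line_number+1):
-- state = (current index `number`, the mutated list `doc`, the flag, the pending insertions)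
def aGo : List String → Int → List String → Bool → List (Int × List Char) → List String × List (Int × List Char)
  | [], _, doc, _, ins => (doc, ins)
  | line :: rest, number, doc, flag, ins =>
    let s := line.toList
    if PySem.Chars.startswith s (pvSpaces 11) then
      aGo rest (number + 1) (PySem.List.pySetD doc number (String.ofList (pvSpaces 7 ++ pvLstrip s))) flag ins
    else if PySem.Chars.startswith s (pvSpaces 8) then
      let t := pvLstrip s
      -- lstrip_line[0] / lstrip_line[1] raise IndexError when missing (excluded by Pre_); `none` takes the non-matching side
      if ((PySem.List.pyGet? t 0).elim false PySem.Chars.isdigit) && (PySem.List.pyGet? t 1 == some '.') then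
        aGo rest (number + 1) (PySem.List.pySetD doc number (String.ofList (pvSpaces 4 ++ t))) flag ins
      else if flag then
        aGo rest (number + 1) (PySem.List.pySetD doc number (String.ofList ("    - ".toList ++ t))) false ins
      else
        aGo rest (number + 1) (PySem.List.pySetD doc number (String.ofList (pvSpaces 6 ++ t))) flag ins
    else if PySem.Chars.startswith s (pvSpaces 4) then
      let t := pvLstrip s
      if PySem.Chars.endswith s [':'] then
        aGo rest (number + 1) (PySem.List.pySetD doc number (String.ofList ("- ".toList ++ t))) true ins
      else if PySem.Chars.isIn [':'] t then
        -- lstrip_line.index(":") after the `":" in lstrip_line` guard = first occurrence = Chars.find (exact here)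
        let ci := PySem.Chars.find t [':']
        aGo rest (number + 1)
          (PySem.List.pySetD doc number (String.ofList ("- ".toList ++ PySem.List.slice t none (some (ci + 1))))) flag
          (ins ++ [(number + 1, PySem.List.slice t (some (ci + 2)) none)])
      else aGo rest (number + 1) doc flag ins
    else (doc, ins)  -- line.startswith("") is always true: break

def markdown_raises_section (line_number : Int) (docstring : List String) : List String :=
  match PySem.List.pyGet? docstring line_number with
  | none => docstring  -- docstring[line_number] raises IndexError (outside Pre_)
  | some cur =>
    let doc1 := PySem.List.pySetD docstring line_number (String.ofList ("**".toList ++ cur.toList ++ "**\n".toList))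
    let p := aGo (PySem.List.slice doc1 (some (line_number + 1)) none) (line_number + 1) doc1 false []
    -- `if insert_text:` then insert in reversed order (fold over [] is the identity)
    p.2.reverse.foldl (fun d q => PySem.List.insert d q.1 (String.ofList ("    - ".toList ++ q.2))) p.1

-- ===== PORT B =====
-- B's while-loop: build the output forward, appending both lines of a 'name: text' pair at once;
-- on the first line with indent < 4 keep the remaining tail unchanged (the `extend` + `break`)
def bGo : List String → Bool → List String
  | [], _ => []
  | line :: rest, flag =>
    let s := line.toList
    let t := pvLstrip s
    let indent := s.length - t.length
    if 11 ≤ indent then String.ofList (pvSpaces 7 ++ t) :: bGo rest flag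
    else if 8 ≤ indent then
      if PySem.Chars.strIsdigit (PySem.List.slice t none (some 1)) && (PySem.List.slice t (some 1) (some 2) == [ '.' ]) then
        String.ofList (pvSpaces 4 ++ t) :: bGo rest flag
      else if flag then String.ofList ("    - ".toList ++ t) :: bGo rest false
      else String.ofList (pvSpaces 6 ++ t) :: bGo rest flag
    else if 4 ≤ indent then
      if PySem.Chars.endswith s [':'] then String.ofList ("- ".toList ++ t) :: bGo rest true
      else if PySem.Chars.isIn [':'] t then
        let ci := PySem.Chars.find t [':']
        String.ofList ("- ".toList ++ PySem.List.slice t none (some (ci + 1))) ::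
          String.ofList ("    - ".toList ++ PySem.List.slice t (some (ci + 2)) none) :: bGo rest flag
      else line :: bGo rest flag
    else line :: rest

def markdown_raises_section_alt (line_number : Int) (docstring : List String) : List String :=
  match PySem.List.pyGet? docstring line_number with
  | none => docstring  -- docstring[line_number] raises IndexError (outside Pre_)
  | some cur =>
    PySem.List.slice docstring none (some line_number) ++
      String.ofList ("**".toList ++ cur.toList ++ "**\n".toList) ::
        bGo (PySem.List.slice docstring (some (line_number + 1)) none) false

-- ===== PRECONDITION & SPEC =====
-- the region A's loop actually scans: lines after line_number up to the first one not starting with 4 spaces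
def pvScanRegion (line_number : Int) (docstring : List String) : List String :=
  (docstring.drop (line_number.toNat + 1)).takeWhile (fun l => PySem.Chars.startswith l.toList (pvSpaces 4))

-- a scanned line on which A's `lstrip_line[0]` / `lstrip_line[1]` raises IndexError
def pvBadLine (l : String) : Bool :=
  PySem.Chars.startswith l.toList (pvSpaces 8) && !PySem.Chars.startswith l.toList (pvSpaces 11) &&
    (let t := pvLstrip l.toList
     t.isEmpty || (t.length == 1 && t.any PySem.Chars.isdigit))

-- Pre_ excludes (a) line_number out of [0, len): ≥ len raises IndexError, and a negative index mixes
-- Python wraparound in the header assignment with an unshifted enumerate start, an accident of A's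
-- implementation no caller (which passes the nonnegative index of the 'Raises:' line) relies on; and
-- (b) scanned 8-space lines whose lstrip is empty or a single digit, where A raises IndexError.
def Pre_markdown_raises_section (line_number : Int) (docstring : List String) : Prop :=
  0 ≤ line_number ∧ line_number < (docstring.length : Int) ∧
    ∀ l ∈ pvScanRegion line_number docstring, pvBadLine l = false
instance (line_number : Int) (docstring : List String) : Decidable (Pre_markdown_raises_section line_number docstring) := by
  unfold Pre_markdown_raises_section; infer_instance

def pvWitness_markdown_raises_section : Int × List String :=
  (0, ["Raises:", "    KeyError: Reason.", ""])

-- On in-range line_number with a scanned 8-space line whose lstrip is empty or a single digit,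
-- A raises IndexError while B returns the section with that line re-indented normally.
def Raises_markdown_raises_section (line_number : Int) (docstring : List String) : Prop :=
  0 ≤ line_number ∧ line_number < (docstring.length : Int) ∧
    ∃ l ∈ pvScanRegion line_number docstring, pvBadLine l = true
instance (line_number : Int) (docstring : List String) : Decidable (Raises_markdown_raises_section line_number docstring) := by
  unfold Raises_markdown_raises_section; infer_instance

def pvRaiseWitness_markdown_raises_section : Int × List String := (0, ["Raises:", "        7"])
def pvRaiseWitnessOut_markdown_raises_section : List String := ["**Raises:**\n", "      7"]

def Spec_markdown_raises_section (line_number : Int) (docstring : List String) (out : List String) : Prop := out = markdown_raises_section_alt line_number docstring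
instance (line_number : Int) (docstring : List String) (out : List String) : Decidable (Spec_markdown_raises_section line_number docstring out) := by unfold Spec_markdown_raises_section; infer_instance

-- ===== CLAIM (what is proved, stated in full; the proofs are below) =====
def Claim_equal_markdown_raises_section : Prop := ∀ (line_number : Int) (docstring : List String), Dom_markdown_raises_section line_number docstring → Pre_markdown_raises_section line_number docstring → Spec_markdown_raises_section line_number docstring (markdown_raises_section line_number docstring)

def Claim_raises_markdown_raises_section : Prop := (∀ (line_number : Int) (docstring : List String), Dom_markdown_raises_section line_number docstring → Raises_markdown_raises_section line_number docstring → ¬ Pre_markdown_raises_section line_number docstring) ∧ (Dom_markdown_raises_section (pvRaiseWitness_markdown_raises_section.1) (pvRaiseWitness_markdown_raises_section.2) ∧ Raises_markdown_raises_section (pvRaiseWitness_markdown_raises_section.1) (pvRaiseWitness_markdown_raises_section.2) ∧ markdown_raises_section_alt (pvRaiseWitness_markdown_raises_section.1) (pvRaiseWitness_markdown_raises_section.2) = pvRaiseWitnessOut_markdown_raises_section)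

-- ===== LEMMAS AND PROOFS =====

-- A's loop, split into its two pure outcomes: the rewritten lines (with the untouched tail)…
def procA : List String → Bool → List String
  | [], _ => []
  | line :: rest, flag =>
    let s := line.toList
    if PySem.Chars.startswith s (pvSpaces 11) then
      String.ofList (pvSpaces 7 ++ pvLstrip s) :: procA rest flag
    else if PySem.Chars.startswith s (pvSpaces 8) then
      let t := pvLstrip s
      if ((PySem.List.pyGet? t 0).elim false PySem.Chars.isdigit) && (PySem.List.pyGet? t 1 == some '.') then
        String.ofList (pvSpaces 4 ++ t) :: procA rest flag
      else if flag then String.ofList ("    - ".toList ++ t) :: procA rest false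
      else String.ofList (pvSpaces 6 ++ t) :: procA rest flag
    else if PySem.Chars.startswith s (pvSpaces 4) then
      let t := pvLstrip s
      if PySem.Chars.endswith s [':'] then String.ofList ("- ".toList ++ t) :: procA rest true
      else if PySem.Chars.isIn [':'] t then
        let ci := PySem.Chars.find t [':']
        String.ofList ("- ".toList ++ PySem.List.slice t none (some (ci + 1))) :: procA rest flag
      else line :: procA rest flag
    else line :: rest

-- …and the collected (index, text) insertions, indices counted from m
def insA : List String → Bool → Nat → List (Int × List Char)
  | [], _, _ => []
  | line :: rest, flag, m =>
    let s := line.toList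
    if PySem.Chars.startswith s (pvSpaces 11) then insA rest flag (m + 1)
    else if PySem.Chars.startswith s (pvSpaces 8) then
      let t := pvLstrip s
      if ((PySem.List.pyGet? t 0).elim false PySem.Chars.isdigit) && (PySem.List.pyGet? t 1 == some '.') then
        insA rest flag (m + 1)
      else if flag then insA rest false (m + 1)
      else insA rest flag (m + 1)
    else if PySem.Chars.startswith s (pvSpaces 4) then
      let t := pvLstrip s
      if PySem.Chars.endswith s [':'] then insA rest true (m + 1)
      else if PySem.Chars.isIn [':'] t then
        ((m : Int) + 1, PySem.List.slice (pvLstrip s) (some (PySem.Chars.find (pvLstrip s) [':'] + 2)) none) :: insA rest flag (m + 1)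
      else insA rest flag (m + 1)
    else []

-- line.startswith(" " * n) says exactly "at least n leading spaces" (= B's indent test)
theorem pvStartswith_spaces (s : List Char) (n : Nat) :
    PySem.Chars.startswith s (pvSpaces n) = decide (n ≤ s.length - (pvLstrip s).length) := by
  induction s generalizing n with
  | nil => cases n <;> simp [PySem.Chars.startswith, pvSpaces, pvLstrip]
  | cons c s ih =>
    cases n with
    | zero => simp [PySem.Chars.startswith, pvSpaces]
    | succ n =>
      by_cases hc : c = ' '
      · subst hc
        have hle := List.length_dropWhile_le (p := fun c => c == ' ') (l := s)
        have h1 : PySem.Chars.startswith (' ' :: s) (pvSpaces (n+1)) = PySem.Chars.startswith s (pvSpaces n) := by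
          simp [PySem.Chars.startswith, pvSpaces, List.replicate_succ]
        have h2 : pvLstrip (' ' :: s) = pvLstrip s := by
          simp [pvLstrip, List.dropWhile]
        rw [h1, h2, ih]
        simp only [pvLstrip] at hle ⊢
        simp only [List.length_cons, decide_eq_decide]
        omega
      · have h1 : PySem.Chars.startswith (c :: s) (pvSpaces (n+1)) = false := by
          simp [PySem.Chars.startswith, pvSpaces, List.replicate_succ, List.isPrefixOf]
          intro h; exact absurd h.symm hc
        have h2 : pvLstrip (c :: s) = c :: s := by
          simp only [pvLstrip, List.dropWhile_cons]
          simp [hc]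
        rw [h1, h2]
        simp

-- A's two character probes and B's two length-1 slices make the same numbered-description test
theorem pvDigitCond (t : List Char) :
    (((PySem.List.pyGet? t 0).elim false PySem.Chars.isdigit) && (PySem.List.pyGet? t 1 == some '.'))
      = (PySem.Chars.strIsdigit (PySem.List.slice t none (some 1)) && (PySem.List.slice t (some 1) (some 2) == [ '.' ])) := by
  have e1 : PySem.List.slice t none (some 1) = t.take 1 := PySem.List.slice_to t (by omega)
  have e2 : PySem.List.slice t (some 1) (some 2) = (t.drop 1).take 1 := by
    simpa using PySem.List.slice_toNat t (a := 1) (b := 2) (by omega) (by omega)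
  have e3 : PySem.List.pyGet? t 0 = t[0]? := PySem.List.pyGet?_zero t
  have e4 : PySem.List.pyGet? t 1 = t[1]? := by
    simpa using PySem.List.pyGet?_of_nonneg t (i := 1) (by omega)
  rw [e1, e2, e3, e4]
  match t with
  | [] => rfl
  | [a] => simp [PySem.Chars.strIsdigit]
  | a :: b :: r => simp [PySem.Chars.strIsdigit]

-- A's loop leaves the prefix untouched, rewrites in place, and collects insertions at increasing indices
theorem aGo_eq (lines : List String) : ∀ (front : List String) (flag : Bool) (ins : List (Int × List Char)),
    aGo lines (front.length : Int) (front ++ lines) flag ins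
      = (front ++ procA lines flag, ins ++ insA lines flag front.length) := by
  induction lines with
  | nil => intro front flag ins; simp [aGo, procA, insA]
  | cons line rest ih =>
    intro front flag ins
    have key : ∀ (v : String) (fl : Bool) (i : List (Int × List Char)),
        aGo rest ((front.length : Int) + 1) ((front ++ [v]) ++ rest) fl i
          = ((front ++ [v]) ++ procA rest fl, i ++ insA rest fl (front.length + 1)) := by
      intro v fl i
      have h := ih (front ++ [v]) fl i
      simpa using h
    have hset : ∀ v : String, PySem.List.pySetD (front ++ line :: rest) (front.length : Int) v = (front ++ [v]) ++ rest := by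
      intro v; simp
    simp only [aGo, procA, insA]
    split_ifs <;>
      first
        | (simp only [hset]; rw [key]; simp)
        | (rw [show (front ++ line :: rest) = (front ++ [line]) ++ rest by simp, key]; simp)
        | simp

-- replaying the collected insertions in reverse turns A's outcome into B's single forward pass
theorem insFold_eq (lines : List String) : ∀ (flag : Bool) (front : List String),
    (insA lines flag front.length).reverse.foldl
        (fun d q => PySem.List.insert d q.1 (String.ofList ("    - ".toList ++ q.2))) (front ++ procA lines flag)
      = front ++ bGo lines flag := by
  induction lines with
  | nil => intro flag front; simp [insA, procA, bGo]
  | cons line rest ih =>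
    intro flag front
    have key : ∀ (v : String) (fl : Bool),
        (insA rest fl (front.length + 1)).reverse.foldl
            (fun d q => PySem.List.insert d q.1 (String.ofList ("    - ".toList ++ q.2))) ((front ++ [v]) ++ procA rest fl)
          = (front ++ [v]) ++ bGo rest fl := by
      intro v fl
      have h := ih fl (front ++ [v])
      simpa using h
    simp only [procA, insA, bGo, pvStartswith_spaces, pvDigitCond]
    by_cases h11 : 11 ≤ line.toList.length - (pvLstrip line.toList).length
    · simp only [h11, decide_true, if_true]
      simpa using key (String.ofList (pvSpaces 7 ++ pvLstrip line.toList)) flag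
    · simp only [h11, decide_false, Bool.false_eq_true, if_false]
      by_cases h8 : 8 ≤ line.toList.length - (pvLstrip line.toList).length
      · simp only [h8, decide_true, if_true]
        by_cases hd : (PySem.Chars.strIsdigit (PySem.List.slice (pvLstrip line.toList) none (some 1))
            && (PySem.List.slice (pvLstrip line.toList) (some 1) (some 2) == [ '.' ])) = true
        · simp only [hd, if_true]
          simpa using key (String.ofList (pvSpaces 4 ++ pvLstrip line.toList)) flag
        · simp only [eq_false_of_ne_true hd, Bool.false_eq_true, if_false]
          cases flag with
          | true =>
            simp only [if_true]
            simpa using key (String.ofList ("    - ".toList ++ pvLstrip line.toList)) false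
          | false =>
            simp only [Bool.false_eq_true, if_false]
            simpa using key (String.ofList (pvSpaces 6 ++ pvLstrip line.toList)) false
      · simp only [h8, decide_false, Bool.false_eq_true, if_false]
        by_cases h4 : 4 ≤ line.toList.length - (pvLstrip line.toList).length
        · simp only [h4, decide_true, if_true]
          by_cases he : PySem.Chars.endswith line.toList [':'] = true
          · simp only [he, if_true]
            simpa using key (String.ofList ("- ".toList ++ pvLstrip line.toList)) true
          · simp only [eq_false_of_ne_true he, Bool.false_eq_true, if_false]
            by_cases hc : PySem.Chars.isIn [':'] (pvLstrip line.toList) = true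
            · simp only [hc, if_true]
              rw [List.reverse_cons, List.foldl_append]
              rw [List.append_cons front]
              rw [key (String.ofList ("- ".toList ++ PySem.List.slice (pvLstrip line.toList) none (some (PySem.Chars.find (pvLstrip line.toList) [':'] + 1)))) flag]
              simp only [List.foldl_cons, List.foldl_nil]
              have hcast : (front.length : Int) + 1 = (((front ++ [String.ofList ("- ".toList ++ PySem.List.slice (pvLstrip line.toList) none (some (PySem.Chars.find (pvLstrip line.toList) [':'] + 1)))]).length : Nat) : Int) := by
                simp
              rw [hcast, PySem.List.insert_natCast _ _ _ (by simp)]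
              rw [List.take_left, List.drop_left]
              simp
            · simp only [eq_false_of_ne_true hc, Bool.false_eq_true, if_false]
              simpa using key line flag
        · simp only [h4, decide_false, Bool.false_eq_true, if_false]
          simp

-- both ports agree for in-range line_number
theorem pvMain (line_number : Int) (docstring : List String)
    (h0 : 0 ≤ line_number) (h1 : line_number < (docstring.length : Int)) :
    markdown_raises_section line_number docstring = markdown_raises_section_alt line_number docstring := by
  obtain ⟨n, rfl⟩ : ∃ n : Nat, line_number = (n : Int) := ⟨line_number.toNat, (Int.toNat_of_nonneg h0).symm⟩
  have hnlt : n < docstring.length := by exact_mod_cast h1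
  have hget : PySem.List.pyGet? docstring (n : Int) = some docstring[n] := by
    rw [PySem.List.pyGet?_natCast]; exact List.getElem?_eq_getElem hnlt
  set hdr := String.ofList ("**".toList ++ docstring[n].toList ++ "**\n".toList) with hhdr
  set front := docstring.take n ++ [hdr] with hfront
  have hflen : front.length = n + 1 := by
    simp [hfront, List.length_take, Nat.min_eq_left (Nat.le_of_lt hnlt)]
  have hset : PySem.List.pySetD docstring (n : Int) hdr = front ++ docstring.drop (n+1) := by
    rw [PySem.List.pySetD_natCast, List.set_eq_take_cons_drop hdr hnlt]
    simp [hfront]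
  have hcast1 : (n : Int) + 1 = ((n + 1 : Nat) : Int) := by push_cast; ring
  have hdropset : PySem.List.slice (front ++ docstring.drop (n+1)) (some ((n:Int) + 1)) none
      = docstring.drop (n+1) := by
    rw [hcast1, PySem.List.slice_from_natCast, ← hflen, List.drop_left]
  unfold markdown_raises_section markdown_raises_section_alt
  rw [hget]
  simp only [← hhdr, hset, hdropset]
  rw [show ((n:Int) + 1) = ((front.length : Nat) : Int) by rw [hflen]; push_cast; ring]
  rw [aGo_eq (docstring.drop (n+1)) front false []]
  simp only [List.nil_append]
  rw [insFold_eq (docstring.drop (n+1)) false front]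
  rw [PySem.List.slice_from_natCast, hflen]
  simp [hfront]

-- ===== VERDICT (by name: the statement is the Claim_ definition above) =====
theorem markdown_raises_section_spec : Claim_equal_markdown_raises_section := by
  intro line_number docstring _hdom hpre
  obtain ⟨h0, h1, -⟩ := hpre
  exact pvMain line_number docstring h0 h1

theorem markdown_raises_section_raises : Claim_raises_markdown_raises_section := by
  unfold Claim_raises_markdown_raises_section
  refine ⟨?_, by decide⟩
  rintro ln doc _ ⟨h0, h1, l, hl, hbad⟩ ⟨_, _, hall⟩
  have := hall l hl
  simp [this] at hbad

-- self-check: the raise witness really lies inside Raises_ (and gives markdown_raises_section_raises its in-file use)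
theorem pvRaiseWitness_ok : Raises_markdown_raises_section pvRaiseWitness_markdown_raises_section.1 pvRaiseWitness_markdown_raises_section.2 := by
  have h := markdown_raises_section_raises
  unfold Claim_raises_markdown_raises_section at h
  exact h.2.2.1
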